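-- pv_equiv track=rewrite | github.com/Cintia60/Information_Theory_PROJECT- | Meta1/projeto_TI.py | simbolo_m
-- ===== SOURCE A (Python) =====
-- def simbolo_m(palavra):
--     lista_2 = []
--     count = {}
--     for i in palavra:
--         # acrescentar elementos a lista
--         lista_2.append(i)
--         # comparar os elementos da lista
--     for j in lista_2:
--         if j not in count:
--             count[j] = 1
--         else:
--             count[j] += 1
--
--     return dict(sorted(count.items()))
-- ===== SOURCE B (Python) =====
-- def simbolo_m(palavra):
--     # sort first, then one run-length pass over consecutive equal symbols;
--     # the dict is built already in sorted key order, so no final sort is needed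
--     out = {}
--     seq = sorted(palavra)
--     if not seq:
--         return out
--     cur = seq[0]
--     n = 1
--     for ch in seq[1:]:
--         if ch == cur:
--             n += 1
--         else:
--             out[cur] = n
--             cur = ch
--             n = 1
--     out[cur] = n
--     return out
-- ===== Notes on version B (the rewrite author's own statement) =====
-- stated objective: alternative
-- what changed: Replaces A's count-into-a-dict-by-membership-test followed by sorting the items with a sort-first strategy: sort the symbols once, then a single run-length pass over the sorted sequence emits each distinct symbol with its run length, producing the dict already in sorted key order with no final sort.
import Mathlib
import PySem

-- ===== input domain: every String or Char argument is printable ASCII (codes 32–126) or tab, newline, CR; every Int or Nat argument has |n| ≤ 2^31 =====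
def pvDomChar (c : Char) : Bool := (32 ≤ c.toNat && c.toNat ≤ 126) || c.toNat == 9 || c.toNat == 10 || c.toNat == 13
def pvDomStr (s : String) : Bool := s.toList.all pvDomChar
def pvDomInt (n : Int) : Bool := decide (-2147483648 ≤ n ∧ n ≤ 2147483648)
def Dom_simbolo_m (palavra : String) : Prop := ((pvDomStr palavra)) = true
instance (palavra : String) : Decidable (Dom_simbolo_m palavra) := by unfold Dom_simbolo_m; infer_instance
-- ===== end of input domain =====

-- B sorts the symbols first and emits run lengths of consecutive equal symbols in one pass
-- (the dict comes out already key-sorted), instead of A's count-into-dict-then-sort-items; alternative decomposition, no speed claim.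


-- ===== PORT A =====
-- for i in palavra: lista_2.append(i); then count by membership test; then dict(sorted(count.items()))
def simbolo_m (palavra : String) : List (String × Int) :=
  let lista_2 : List String :=
    palavra.toList.foldl (fun acc i => acc ++ [String.mk [i]]) []
  let count : PySem.Dict String Int :=
    lista_2.foldl
      (fun d j => if d.contains j = false then d.insert j 1 else d.modify j 0 (· + 1))
      PySem.Dict.empty
  PySem.List.sorted2 count.items (fun p => p.1) (fun p => p.2) false

-- ===== PORT B =====
-- the run-length loop of Source B: out accumulates finished runs, (cur, n) is the current run
def pvRleLoop (seq : List String) (out : List (String × Int)) (cur : String) (n : Int) :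
    List (String × Int) :=
  match seq with
  | [] => out ++ [(cur, n)]
  | ch :: rest =>
      if ch = cur then pvRleLoop rest out cur (n + 1)
      else pvRleLoop rest (out ++ [(cur, n)]) ch 1

def simbolo_m_alt (palavra : String) : List (String × Int) :=
  match PySem.List.sorted (palavra.toList.map (fun c => String.mk [c])) (fun x => x) false with
  | [] => []
  | c :: rest => pvRleLoop rest [] c 1

-- ===== PRECONDITION & SPEC =====
def Spec_simbolo_m (palavra : String) (out : List (String × Int)) : Prop := out = simbolo_m_alt palavra
instance (palavra : String) (out : List (String × Int)) : Decidable (Spec_simbolo_m palavra out) := by unfold Spec_simbolo_m; infer_instance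

-- ===== CLAIM (what is proved, stated in full; the proofs are below) =====
def Claim_equal_simbolo_m : Prop := ∀ (palavra : String), Dom_simbolo_m palavra → Spec_simbolo_m palavra (simbolo_m palavra)

-- ===== LEMMAS AND PROOFS =====

-- A's accumulation step IS Counter's step: on a fresh key, modify with default 0 inserts 1.
lemma pv_step_eq_counter_step :
    (fun (d : PySem.Dict String Int) j =>
        if d.contains j = false then d.insert j 1 else d.modify j 0 (· + 1)) =
      fun (d : PySem.Dict String Int) j => d.modify j 0 (· + 1) := by
  funext d j
  by_cases h : d.contains j = true
  · simp [h]
  · simp only [Bool.not_eq_true] at h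
    rw [PySem.Dict.modify, PySem.Dict.getD_of_not_contains d (0 : Int) h]
    simp [h]

-- set(xs) is a sublist of xs
lemma pv_ofList_sublist {α : Type} [BEq α] [LawfulBEq α] (xs : List α) :
    (PySem.Set.ofList xs).Sublist xs := by
  induction xs with
  | nil => simp [PySem.Set.ofList]
  | cons x t ih =>
      rw [PySem.Set.ofList_cons, PySem.Set.discard]
      exact List.Sublist.cons₂ x (List.Sublist.trans List.filter_sublist ih)

-- set(filter) = filter(set): first occurrences commute with a filter
lemma pv_ofList_filter {α : Type} [BEq α] [LawfulBEq α] (p : α → Bool) (t : List α) :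
    PySem.Set.ofList (t.filter p) = (PySem.Set.ofList t).filter p := by
  induction t with
  | nil => simp [PySem.Set.ofList]
  | cons x t ih =>
      by_cases hp : p x = true
      · rw [List.filter_cons_of_pos hp, PySem.Set.ofList_cons, PySem.Set.ofList_cons,
          PySem.Set.discard, PySem.Set.discard, ih]
        simp only [List.filter_cons_of_pos hp, List.filter_filter]
        congr 1
        apply List.filter_congr
        intro a _
        exact Bool.and_comm _ _
      · have hp' : p x = false := by simpa using hp
        rw [List.filter_cons_of_neg (by simp [hp']), ih, PySem.Set.ofList_cons,
          PySem.Set.discard]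
        simp only [List.filter_cons_of_neg (by simp [hp'] : ¬ p x = true), List.filter_filter]
        apply List.filter_congr
        intro a ha
        by_cases hax : a = x
        · subst hax; simp [hp']
        · simp [hax]

-- removing x from set(t) is set(t with x filtered out)
lemma pv_discard_ofList {α : Type} [BEq α] [LawfulBEq α] [DecidableEq α] (t : List α) (x : α) :
    (PySem.Set.ofList t).discard x = PySem.Set.ofList (t.filter (fun y => y ≠ x)) := by
  rw [PySem.Set.discard]
  have h : (t.filter (fun y => y ≠ x)) = t.filter (fun y => !(y == x)) := by
    apply List.filter_congr; intro a _
    by_cases hax : a = x <;> simp [hax]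
  rw [h, pv_ofList_filter]

-- set(s) of a ≤-sorted list is strictly increasing
lemma pv_ofList_pairwise_lt (s : List String) (hs : s.Pairwise (· ≤ ·)) :
    (PySem.Set.ofList s).Pairwise (· < ·) := by
  have hsub := pv_ofList_sublist s
  have hle : (PySem.Set.ofList s).Pairwise (· ≤ ·) := hs.sublist hsub
  have hnd : (PySem.Set.ofList s).Nodup := PySem.Set.nodup_ofList s
  exact (hnd.and hle).imp (fun h => lt_of_le_of_ne h.2 h.1)

-- the run-length loop over a ≤-sorted tail computes each distinct symbol with its count
lemma pv_rleLoop_spec (xs : List String) :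
    ∀ (out : List (String × Int)) (cur : String) (n : Int),
      (cur :: xs).Pairwise (· ≤ ·) →
      pvRleLoop xs out cur n =
        out ++ (cur, n + (xs.count cur : Int)) ::
          (PySem.Set.ofList (xs.filter (fun y => y ≠ cur))).map
            (fun k => (k, (xs.count k : Int))) := by
  induction xs with
  | nil => intro out cur n _; simp [pvRleLoop, PySem.Set.ofList]
  | cons x t ih =>
      intro out cur n hp
      have hcx : cur ≤ x := (List.pairwise_cons.1 hp).1 x (by simp)
      have hpt : (x :: t).Pairwise (· ≤ ·) := (List.pairwise_cons.1 hp).2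
      by_cases hx : x = cur
      · subst hx
        rw [pvRleLoop, if_pos rfl, ih out x (n + 1) hpt]
        have hfil : (x :: t).filter (fun y => y ≠ x) = t.filter (fun y => y ≠ x) := by simp
        rw [hfil]
        congr 2
        · simp [List.count_cons]; ring
        · apply List.map_congr_left
          intro k hk
          have hk' : ¬ (k = x) := by
            have h1 := List.of_mem_filter ((PySem.Set.mem_ofList _ _).1 hk)
            simpa using h1
          have hk2 : ¬ (x = k) := fun h => hk' h.symm
          simp [List.count_cons, hk', hk2]
      · rw [pvRleLoop, if_neg hx, ih (out ++ [(cur, n)]) x 1 hpt]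
        have hcur_lt : cur < x := lt_of_le_of_ne hcx (fun h => hx h.symm)
        have hcur_not : cur ∉ x :: t := by
          intro hmem
          rcases List.mem_cons.1 hmem with h | hmem'
          · exact hx h.symm
          · have hxc : x ≤ cur := (List.pairwise_cons.1 hpt).1 cur hmem'
            exact absurd hcur_lt (not_lt.2 hxc)
        have hcnt0 : (x :: t).count cur = 0 := List.count_eq_zero.2 hcur_not
        have hfil : (x :: t).filter (fun y => y ≠ cur) = x :: t := by
          rw [List.filter_eq_self]
          intro a ha
          simp only [ne_eq, decide_eq_true_eq]
          intro h; subst h; exact hcur_not ha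
        have hmap : List.map (fun k => (k, ((x :: t).count k : Int)))
            (PySem.Set.ofList (t.filter (fun y => y ≠ x))) =
            List.map (fun k => (k, (t.count k : Int)))
            (PySem.Set.ofList (t.filter (fun y => y ≠ x))) := by
          apply List.map_congr_left
          intro k hk
          have hk' : ¬ (k = x) := by
            have h1 := List.of_mem_filter ((PySem.Set.mem_ofList _ _).1 hk)
            simpa using h1
          have hk2 : ¬ (x = k) := fun h => hk' h.symm
          simp [List.count_cons, hk', hk2]
        have hhead : (((x :: t).count x : Nat) : Int) = 1 + ((t.count x : Nat) : Int) := by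
          simp [List.count_cons]
          omega
        rw [hcnt0, hfil, PySem.Set.ofList_cons, pv_discard_ofList, List.map_cons, hmap, hhead]
        simp

-- insertBy only looks at comparisons of x against list members
lemma pv_insertBy_congr {α : Type} (b b' : α → α → Bool) (x : α) (ys : List α)
    (h : ∀ y ∈ ys, b x y = b' x y) :
    PySem.List.insertBy b x ys = PySem.List.insertBy b' x ys := by
  induction ys with
  | nil => rfl
  | cons y ys ih =>
      simp only [PySem.List.insertBy]
      rw [h y (by simp)]
      by_cases hb : b' x y = true
      · simp [hb]
      · simp only [Bool.not_eq_true] at hb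
        simp [hb, ih (fun z hz => h z (by simp [hz]))]

-- folding insertBy is unchanged when the two orderings agree on all pairs drawn from xs0
lemma pv_foldl_insertBy_congr {α : Type} (b b' : α → α → Bool) (xs0 : List α)
    (hbb : ∀ x ∈ xs0, ∀ y ∈ xs0, b x y = b' x y) :
    ∀ (xs acc : List α), (∀ x ∈ xs, x ∈ xs0) → (∀ x ∈ acc, x ∈ xs0) →
      xs.foldl (fun acc x => PySem.List.insertBy b x acc) acc =
        xs.foldl (fun acc x => PySem.List.insertBy b' x acc) acc := by
  intro xs
  induction xs with
  | nil => intro acc _ _; rfl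
  | cons x t ih =>
      intro acc hxs hacc
      simp only [List.foldl_cons]
      have hx0 : x ∈ xs0 := hxs x (by simp)
      rw [pv_insertBy_congr b b' x acc (fun y hy => hbb x hx0 y (hacc y hy))]
      exact ih _ (fun z hz => hxs z (by simp [hz]))
        (fun z hz => by
          rcases (PySem.List.mem_insertBy _ _ _ _).1 hz with h | h
          · exact h ▸ hx0
          · exact hacc z h)

-- sorted2 with a tuple key collapses to sorted by the first key when the second is a function of the first
lemma pv_sorted2_eq_sorted (xs : List (String × Int))
    (hk : ∀ x ∈ xs, ∀ y ∈ xs, x.1 = y.1 → x.2 = y.2) :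
    PySem.List.sorted2 xs (fun p => p.1) (fun p => p.2) false =
      PySem.List.sorted xs (fun p => p.1) false := by
  show xs.foldl (fun acc x => PySem.List.insertBy _ x acc) [] =
    xs.foldl (fun acc x => PySem.List.insertBy _ x acc) []
  apply pv_foldl_insertBy_congr _ _ xs _ xs [] (fun _ h => h) (by simp)
  intro x hx y hy
  by_cases h1 : x.1 = y.1
  · have h2 : x.2 = y.2 := hk x hx y hy h1
    simp [h1, h2]
  · rcases lt_or_gt_of_ne h1 with h | h
    · simp [h, not_lt.2 (le_of_lt h)]
    · simp [h, not_lt.2 (le_of_lt h), ne_comm.1 h1]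

-- B's whole result on a nonempty ≤-sorted list: the strictly increasing (symbol, count) table
lemma pv_rle_sorted (c : String) (rest : List String)
    (hs : (c :: rest).Pairwise (· ≤ ·)) :
    pvRleLoop rest [] c 1 =
      (PySem.Set.ofList (c :: rest)).map (fun k => (k, ((c :: rest).count k : Int))) := by
  have hhead : (((c :: rest).count c : Nat) : Int) = 1 + ((rest.count c : Nat) : Int) := by
    simp [List.count_cons]
    omega
  rw [pv_rleLoop_spec rest [] c 1 hs, PySem.Set.ofList_cons, pv_discard_ofList,
    List.map_cons, hhead]
  simp only [List.nil_append]
  congr 1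
  apply List.map_congr_left
  intro k hk
  have hk' : ¬ (k = c) := by
    have h1 := List.of_mem_filter ((PySem.Set.mem_ofList _ _).1 hk)
    simpa using h1
  have hk2 : ¬ (c = k) := fun h => hk' h.symm
  simp [List.count_cons, hk', hk2]

-- ===== VERDICT (by name: the statement is the Claim_ definition above) =====
theorem simbolo_m_spec : Claim_equal_simbolo_m := by
  intro palavra _
  unfold Spec_simbolo_m simbolo_m simbolo_m_alt
  simp only []
  set l : List String := palavra.toList.map (fun c => String.mk [c]) with hl
  set s : List String := PySem.List.sorted l (fun x => x) false with hs
  -- A side: the two loops are Counter(l), items are the distinct-key/count table of l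
  rw [PySem.List.foldl_append_singleton_eq_map, List.nil_append, pv_step_eq_counter_step]
  have hcounter :
      l.foldl (fun d j => d.modify j 0 (· + 1)) PySem.Dict.empty = PySem.Dict.counter l := by
    rw [PySem.Dict.counter_eq_foldl]
  rw [hcounter, PySem.Dict.items_counter]
  -- collapse the tuple key
  rw [pv_sorted2_eq_sorted _ (by
    intro x hx y hy h1
    rcases List.mem_map.1 hx with ⟨k, _, rfl⟩
    rcases List.mem_map.1 hy with ⟨k', _, rfl⟩
    simp only at h1
    simp [h1])]
  -- B side: run-length of the sorted symbols
  have hsp : s.Pairwise (· ≤ ·) := PySem.List.sorted_pairwise l (fun x => x)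
  rcases hse : s with _ | ⟨c, rest⟩
  · -- empty input: both sides are []
    have hle : l = [] := (PySem.List.sorted_eq_nil_iff l (fun x => x) false).1 (hs ▸ hse)
    rw [hle]
    simp [PySem.Set.ofList, PySem.List.sorted]
  · -- nonempty: B is the strictly increasing table of s, which names A's sorted order
    change _ = pvRleLoop rest [] c 1
    rw [pv_rle_sorted c rest (hse ▸ hsp), ← hse]
    apply PySem.List.sorted_eq_of_perm_of_pairwise_lt
    · have hperm : s.Perm l := PySem.List.sorted_perm l (fun x => x) false
      have hof : (PySem.Set.ofList s).Perm (PySem.Set.ofList l) := by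
        rw [List.perm_ext_iff_of_nodup (PySem.Set.nodup_ofList s) (PySem.Set.nodup_ofList l)]
        intro a
        rw [PySem.Set.mem_ofList, PySem.Set.mem_ofList]
        exact hperm.mem_iff
      have hfun : (fun k => (k, (s.count k : Int))) = fun k => (k, (l.count k : Int)) := by
        funext k; rw [hperm.count_eq]
      rw [hfun]
      exact hof.map _
    · have := pv_ofList_pairwise_lt s hsp
      rw [List.pairwise_map]
      exact this
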